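-- pv_equiv track=rewrite | github.com/hzdev123/advent-of-code-2020 | AoC_2020_Day_1/src/Data_generator.py | get_Day_1_2_Tracked_Data
-- ===== SOURCE A (Python) =====
-- def get_Day_1_2_Tracked_Data(n):
--     """
--     Returns a list over the number of iterations from 1 to n + 1
--
--     These data points represent solving day-1-2 while tracking list position
--
--     Parameters
--     ----------
--     n : int
--         number of list entries
--
--     Returns
--     -------
--     list
--         contains the number of iterations from 1 to n + 1
--
--     """
--     data = []
--     prev_sum = 0
--     for i in range(1, n + 1):
--         if i > 2:
--             prev_sum = sum(range(1, i - 1)) + prev_sum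
--             data.append(prev_sum)
--         else:
--             data.append(0)
--     return data
-- ===== SOURCE B (Python) =====
-- def get_Day_1_2_Tracked_Data(n):
--     # closed form: each entry is a tetrahedral number
--     return [0 if i <= 2 else (i - 2) * (i - 1) * i // 6 for i in range(1, n + 1)]
-- ===== Notes on version B (the rewrite author's own statement) =====
-- stated objective: faster
-- what changed: Replaced A's loop with a per-iteration inner sum(range(...)) and a running accumulator by a single comprehension computing each entry directly as the closed-form tetrahedral number.
import Mathlib
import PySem

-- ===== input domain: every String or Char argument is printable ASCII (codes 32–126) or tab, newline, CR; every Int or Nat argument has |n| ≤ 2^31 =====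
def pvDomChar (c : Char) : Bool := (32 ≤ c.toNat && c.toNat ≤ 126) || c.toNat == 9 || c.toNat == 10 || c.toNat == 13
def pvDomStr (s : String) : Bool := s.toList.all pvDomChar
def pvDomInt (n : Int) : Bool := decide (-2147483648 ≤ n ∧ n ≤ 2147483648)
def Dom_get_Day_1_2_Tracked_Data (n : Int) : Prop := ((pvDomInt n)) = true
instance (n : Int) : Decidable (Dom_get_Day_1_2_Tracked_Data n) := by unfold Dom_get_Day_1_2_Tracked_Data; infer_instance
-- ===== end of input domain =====

-- B replaces A's quadratic loop (inner sum(range) + accumulator) with the closed-form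
-- tetrahedral number per entry, computed in a single comprehension (measurably faster).


-- ===== PORT A =====
-- loop body of A: state is (data, prev_sum)
def pvStepA (st : List Int × Int) (i : Int) : List Int × Int :=
  if i > 2 then
    let ps := (PySem.List.pyRange 1 (i - 1) 1).foldl (· + ·) 0 + st.2
    (st.1 ++ [ps], ps)
  else
    (st.1 ++ [0], st.2)

def get_Day_1_2_Tracked_Data (n : Int) : List Int :=
  ((PySem.List.pyRange 1 (n + 1) 1).foldl pvStepA ([], 0)).1

-- ===== PORT B =====
-- B's comprehension body: closed-form tetrahedral number
def pvClosed (i : Int) : Int :=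
  if i ≤ 2 then 0 else PySem.Int.floordiv ((i - 2) * (i - 1) * i) 6

def get_Day_1_2_Tracked_Data_alt (n : Int) : List Int :=
  (PySem.List.pyRange 1 (n + 1) 1).map pvClosed

-- ===== PRECONDITION & SPEC =====
def Spec_get_Day_1_2_Tracked_Data (n : Int) (out : List Int) : Prop := out = get_Day_1_2_Tracked_Data_alt n
instance (n : Int) (out : List Int) : Decidable (Spec_get_Day_1_2_Tracked_Data n out) := by unfold Spec_get_Day_1_2_Tracked_Data; infer_instance

-- ===== CLAIM (what is proved, stated in full; the proofs are below) =====
def Claim_equal_get_Day_1_2_Tracked_Data : Prop := ∀ (n : Int), Dom_get_Day_1_2_Tracked_Data n → Spec_get_Day_1_2_Tracked_Data n (get_Day_1_2_Tracked_Data n)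

-- ===== LEMMAS AND PROOFS =====

lemma pv_fd6 (t : Int) : PySem.Int.floordiv (6 * t) 6 = t := by
  rw [PySem.Int.floordiv_eq_ediv_of_pos (by norm_num)]
  exact Int.mul_ediv_cancel_left t (by norm_num)

lemma pv_sumr (m : Nat) :
    2 * ((PySem.List.pyRange 1 (m : Int) 1).foldl (· + ·) 0) = ((m : Int) - 1) * (m : Int) := by
  induction m with
  | zero => rw [PySem.List.pyRange_one_eq_nil (by norm_num)]; norm_num
  | succ k ih =>
    push_cast
    rcases Nat.eq_zero_or_pos k with hk | hk
    · subst hk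
      rw [show ((0 : Nat) : Int) + 1 = 1 by norm_num, PySem.List.pyRange_one_eq_nil (by norm_num)]
      norm_num
    · rw [PySem.List.pyRange_one_succ_right (by exact_mod_cast hk)]
      rw [List.foldl_append]
      simp only [List.foldl]
      push_cast at ih
      linear_combination ih

lemma pv_main (m : Nat) : ∃ t : Int,
    (PySem.List.pyRange 1 ((m : Int) + 1) 1).foldl pvStepA ([], 0) =
      ((PySem.List.pyRange 1 ((m : Int) + 1) 1).map pvClosed, t) ∧
    ((m : Int) - 2) * ((m : Int) - 1) * (m : Int) = 6 * t := by
  induction m with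
  | zero =>
    refine ⟨0, ?_, by norm_num⟩
    rw [PySem.List.pyRange_one_eq_nil (by norm_num)]; rfl
  | succ k ih =>
    obtain ⟨t, hfold, ht⟩ := ih
    push_cast
    have hsplit : PySem.List.pyRange 1 ((k : Int) + 1 + 1) 1 =
        PySem.List.pyRange 1 ((k : Int) + 1) 1 ++ [(k : Int) + 1] :=
      PySem.List.pyRange_one_succ_right (by omega)
    rw [hsplit, List.foldl_append, hfold, List.map_append]
    by_cases hk : 2 ≤ k
    · set S : Int := (PySem.List.pyRange 1 (k : Int) 1).foldl (· + ·) 0 with hS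
      have h6 : ((k : Int) + 1 - 2) * ((k : Int) + 1 - 1) * ((k : Int) + 1) = 6 * (S + t) := by
        linear_combination (-3 : Int) * pv_sumr k + ht
      refine ⟨S + t, ?_, h6⟩
      have hgt : ((k : Int) + 1) > 2 := by exact_mod_cast (by omega : (2 : Int) < (k : Int) + 1)
      have hcl : pvClosed ((k : Int) + 1) = S + t := by
        simp only [pvClosed]
        rw [if_neg (by omega), h6, pv_fd6]
      simp only [List.foldl, pvStepA, if_pos hgt, List.map]
      rw [hcl]
      norm_num [hS]
    · have ht0 : t = 0 := by
        interval_cases k <;> norm_num at ht <;> omega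
      subst ht0
      have hle : ¬ ((k : Int) + 1 > 2) := by omega
      have hcl : pvClosed ((k : Int) + 1) = 0 := by
        simp only [pvClosed]; rw [if_pos (by omega)]
      refine ⟨0, ?_, ?_⟩
      · simp only [List.foldl, pvStepA, if_neg hle, List.map]
        rw [hcl]
      · interval_cases k <;> norm_num
-- ===== VERDICT (by name: the statement is the Claim_ definition above) =====
theorem get_Day_1_2_Tracked_Data_spec : Claim_equal_get_Day_1_2_Tracked_Data := by
  intro n _
  unfold Spec_get_Day_1_2_Tracked_Data get_Day_1_2_Tracked_Data get_Day_1_2_Tracked_Data_alt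
  by_cases hn : n ≤ 0
  · rw [PySem.List.pyRange_one_eq_nil (by omega)]; rfl
  · have h : ((n.toNat : Int)) = n := Int.toNat_of_nonneg (by omega)
    obtain ⟨t, hfold, -⟩ := pv_main n.toNat
    rw [← h, hfold]
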